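-- pv_equiv track=rewrite | github.com/zarzouram/lt2316-h20-aa2 | aa1/data_loading.py | __combine_labels
-- ===== SOURCE A (Python) =====
-- def __combine_labels(seq, loc):
--     token_new = [seq[0]]
--     start, end = zip(*loc)
--     diff = [a - b for a, b in zip(end[:-1], start[1:])]
--     for i, d in enumerate(diff):
--         if d == 0:
--             temp = token_new[-1] + " | " + seq[i+1]
--             token_new[-1] = temp
--         else:
--             token_new.append(seq[i+1])
--
--     return token_new
-- ===== SOURCE B (Python) =====
-- def __combine_labels(seq, loc):
--     n = len(loc)
--     bounds = [0] + [i for i in range(1, n) if loc[i - 1][1] != loc[i][0]] + [n]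
--     return [" | ".join(seq[a:b]) for a, b in zip(bounds, bounds[1:])]
-- ===== Notes on version B (the rewrite author's own statement) =====
-- stated objective: alternative
-- what changed: B computes the list of break indices (where spans are not contiguous) in a first pass, then builds the result by slicing seq between consecutive boundary indices and joining each slice with ' | ', instead of A's diff list plus a fold that rewrites a running concatenated last string in place; A raises on empty input and when loc is longer than seq, which Pre_ excludes.
import Mathlib
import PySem

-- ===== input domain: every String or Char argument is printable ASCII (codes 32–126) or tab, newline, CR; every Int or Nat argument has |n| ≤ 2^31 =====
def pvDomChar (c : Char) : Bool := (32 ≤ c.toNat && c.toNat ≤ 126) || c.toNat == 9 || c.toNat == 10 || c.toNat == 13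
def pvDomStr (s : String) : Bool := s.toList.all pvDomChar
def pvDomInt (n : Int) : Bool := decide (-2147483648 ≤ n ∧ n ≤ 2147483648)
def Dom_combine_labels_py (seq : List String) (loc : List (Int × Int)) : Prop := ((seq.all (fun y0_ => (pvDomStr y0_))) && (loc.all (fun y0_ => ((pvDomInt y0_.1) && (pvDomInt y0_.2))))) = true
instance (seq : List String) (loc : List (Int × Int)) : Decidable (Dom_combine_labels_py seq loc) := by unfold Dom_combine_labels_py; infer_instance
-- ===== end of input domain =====

-- B first computes the list of break indices (where consecutive spans are not contiguous) and
-- then builds the output by slicing seq between consecutive boundaries and joining each slice,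
-- instead of A's diff list plus a fold that rewrites a running concatenated last string.

-- ===== PORT A =====
def combine_labels_py (seq : List String) (loc : List (Int × Int)) : List String :=
  let token_new : List String := [(PySem.List.pyGet? seq 0).getD ""]  -- seq[0]; Pre_ excludes seq = []
  let start : List Int := loc.map Prod.fst                            -- start, end = zip(*loc); Pre_ excludes loc = []
  let stop : List Int := loc.map Prod.snd
  let diff : List Int :=                                              -- [a - b for a, b in zip(end[:-1], start[1:])]
    (List.zip (PySem.List.slice stop none (some (-1))) (PySem.List.slice start (some 1) none)).map
      (fun p => p.1 - p.2)
  (PySem.List.enumerate diff).foldl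
    (fun tn p =>
      if p.2 = 0 then
        -- token_new[-1] = token_new[-1] + " | " + seq[i+1]
        tn.dropLast ++ [(PySem.List.pyGet? tn (-1)).getD "" ++ " | " ++ (PySem.List.pyGet? seq (p.1 + 1)).getD ""]
      else
        tn ++ [(PySem.List.pyGet? seq (p.1 + 1)).getD ""])
    token_new

-- ===== PORT B =====
def combine_labels_py_alt (seq : List String) (loc : List (Int × Int)) : List String :=
  let n : Int := (loc.length : Int)
  -- bounds = [0] + [i for i in range(1, n) if loc[i-1][1] != loc[i][0]] + [n]
  let bounds : List Int :=
    [0] ++ (PySem.List.pyRange 1 n 1).filter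
        (fun j => ((PySem.List.pyGet? loc (j - 1)).getD (0, 0)).2 ≠ ((PySem.List.pyGet? loc j).getD (0, 0)).1)
      ++ [n]
  -- [" | ".join(seq[a:b]) for a, b in zip(bounds, bounds[1:])]
  (List.zip bounds (PySem.List.slice bounds (some 1) none)).map
    (fun p => PySem.Str.join " | " (PySem.List.slice seq (some p.1) (some p.2)))

-- ===== PRECONDITION & SPEC =====
-- Pre_ excludes exactly the inputs on which A raises: seq = [] (IndexError on seq[0]),
-- loc = [] (ValueError unpacking zip(*loc)), and len(loc) > len(seq) (IndexError on seq[i+1]).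
def Pre_combine_labels_py (seq : List String) (loc : List (Int × Int)) : Prop :=
  seq ≠ [] ∧ loc ≠ [] ∧ loc.length ≤ seq.length
instance (seq : List String) (loc : List (Int × Int)) : Decidable (Pre_combine_labels_py seq loc) := by
  unfold Pre_combine_labels_py; infer_instance
def pvWitness_combine_labels_py : List String × (List (Int × Int)) :=
  (["a", "b", "c"], [(0, 2), (2, 5), (9, 11)])

def Spec_combine_labels_py (seq : List String) (loc : List (Int × Int)) (out : List String) : Prop := out = combine_labels_py_alt seq loc
instance (seq : List String) (loc : List (Int × Int)) (out : List String) : Decidable (Spec_combine_labels_py seq loc out) := by unfold Spec_combine_labels_py; infer_instance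

-- ===== CLAIM (what is proved, stated in full; the proofs are below) =====
def Claim_equal_combine_labels_py : Prop := ∀ (seq : List String) (loc : List (Int × Int)), Dom_combine_labels_py seq loc → Pre_combine_labels_py seq loc → Spec_combine_labels_py seq loc (combine_labels_py seq loc)

-- ===== LEMMAS AND PROOFS =====

-- " | ".join of a one-element group is that element
lemma join_singleton (x : String) : PySem.Str.join " | " [x] = x := by
  rw [← String.toList_inj]
  simp [PySem.Str.toList_join, PySem.Chars.join, List.intercalate]

lemma inter_append (sep x : List Char) :
    ∀ (l : List (List Char)), l ≠ [] → sep.intercalate (l ++ [x]) = sep.intercalate l ++ sep ++ x := by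
  intro l
  induction l with
  | nil => intro h; exact absurd rfl h
  | cons a as ih =>
    intro _
    cases as with
    | nil => simp [List.intercalate]
    | cons b bs =>
      have h := ih (by simp)
      have e1 : sep.intercalate ((a :: b :: bs) ++ [x]) = a ++ sep ++ sep.intercalate ((b :: bs) ++ [x]) := by
        simp [List.intercalate]
      have e2 : sep.intercalate (a :: b :: bs) = a ++ sep ++ sep.intercalate (b :: bs) := by
        simp [List.intercalate]
      rw [e1, h, e2]
      simp [List.append_assoc]

-- joining one token more appends " | " ++ token
lemma join_append_singleton (g : List String) (x : String) (hg : g ≠ []) :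
    PySem.Str.join " | " (g ++ [x]) = PySem.Str.join " | " g ++ " | " ++ x := by
  rw [← String.toList_inj]
  simp only [PySem.Str.toList_join, String.toList_append, List.map_append, List.map_cons,
    List.map_nil, PySem.Chars.join]
  exact inter_append _ _ _ (by simpa using hg)

-- consecutive pairs of xs ++ [y]
lemma zip_tail_append_singleton {α : Type} (xs : List α) (y : α) (h : xs ≠ []) :
    List.zip (xs ++ [y]) (xs ++ [y]).tail = List.zip xs xs.tail ++ [(xs.getLast h, y)] := by
  induction xs with
  | nil => exact absurd rfl h
  | cons a as ih =>
    cases as with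
    | nil => simp
    | cons b bs =>
      have hrec := ih (by simp)
      simp only [List.cons_append, List.tail_cons, List.zip_cons_cons] at hrec ⊢
      rw [hrec]
      simp [List.getLast]

-- B's boundary list and chunk list, generic in the break test and the token function
def pvBr (loc : List (Int × Int)) : Int → Bool := fun i =>
  ((PySem.List.pyGet? loc i).getD (0, 0)).2 ≠ ((PySem.List.pyGet? loc (i + 1)).getD (0, 0)).1

def pvTok (seq : List String) : Int → String := fun i => (PySem.List.pyGet? seq i).getD ""

def pvBounds (br : Int → Bool) (m : Nat) : List Int :=
  [0] ++ (PySem.List.pyRange 1 ((m : Int) + 1) 1).filter (fun j => br (j - 1)) ++ [(m : Int) + 1]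

def pvChunks (br : Int → Bool) (t : Int → String) (m : Nat) : List String :=
  (List.zip (pvBounds br m) (pvBounds br m).tail).map
    (fun p => PySem.Str.join " | " ((PySem.List.pyRange p.1 p.2 1).map t))

lemma mem_filter_range_bound {br : Int → Bool} {m : Nat} {x : Int}
    (hx : x ∈ (PySem.List.pyRange 1 ((m : Int) + 1) 1).filter (fun j => br (j - 1))) :
    1 ≤ x ∧ x ≤ (m : Int) := by
  have := PySem.List.mem_pyRange_one.mp (List.mem_of_mem_filter hx)
  omega

lemma pvBounds_mem (br : Int → Bool) (m : Nat) (x : Int) (hx : x ∈ pvBounds br m) :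
    0 ≤ x ∧ x ≤ (m : Int) + 1 := by
  unfold pvBounds at hx
  rcases List.mem_append.mp hx with h | h
  · rcases List.mem_append.mp h with h0 | hf
    · simp at h0; omega
    · have := mem_filter_range_bound hf; omega
  · simp at h; omega

-- core: A's fold over the diff indices equals B's boundary chunks (generic)
lemma pv_main (br : Int → Bool) (t : Int → String) (m : Nat) :
    (PySem.List.pyRange 0 (m : Int) 1).foldl
      (fun tn i => if br i then tn ++ [t (i + 1)]
        else tn.dropLast ++ [(PySem.List.pyGet? tn (-1)).getD "" ++ " | " ++ t (i + 1)]) [t 0]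
    = pvChunks br t m := by
  induction m with
  | zero =>
    rw [show ((0 : Nat) : Int) = 0 from rfl, PySem.List.pyRange_one_eq_nil le_rfl]
    simp only [List.foldl_nil, pvChunks, pvBounds]
    rw [show ((0 : Nat) : Int) + 1 = 1 by norm_num, PySem.List.pyRange_one_eq_nil (le_refl (1 : Int))]
    have h01 : PySem.List.pyRange 0 1 1 = [0] := by
      rw [PySem.List.pyRange_one_cons (by omega), PySem.List.pyRange_one_eq_nil (by omega)]
    simp [h01, join_singleton]
  | succ m ih =>
    have hM : (0 : Int) ≤ (m : Int) := Int.natCast_nonneg m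
    have hcast : ((m + 1 : Nat) : Int) = (m : Int) + 1 := by push_cast; ring
    rw [hcast, PySem.List.pyRange_one_succ_right hM, List.foldl_append, ih, List.foldl_cons,
      List.foldl_nil]
    unfold pvChunks pvBounds
    rw [hcast]
    have hrange : PySem.List.pyRange 1 ((m : Int) + 1 + 1) 1
        = PySem.List.pyRange 1 ((m : Int) + 1) 1 ++ [(m : Int) + 1] :=
      PySem.List.pyRange_one_succ_right (by omega)
    have hsing : List.filter (fun j => br (j - 1)) [(m : Int) + 1]
        = if br (m : Int) then [(m : Int) + 1] else [] := by
      simp [List.filter_singleton, add_sub_cancel_right]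
    rw [hrange, List.filter_append, hsing]
    set F := (PySem.List.pyRange 1 ((m : Int) + 1) 1).filter (fun j => br (j - 1)) with hF
    by_cases hbr : br (m : Int) = true
    · rw [if_pos hbr, if_pos hbr]
      have hgrp : ([0] ++ (F ++ [(m : Int) + 1]) ++ [(m : Int) + 1 + 1] : List Int)
          = ([0] ++ F ++ [(m : Int) + 1]) ++ [(m : Int) + 1 + 1] := by
        simp [List.append_assoc]
      rw [hgrp]
      have hne : ([0] ++ F ++ [(m : Int) + 1] : List Int) ≠ [] := by simp
      rw [zip_tail_append_singleton _ _ hne, List.map_append]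
      have hlast : ([0] ++ F ++ [(m : Int) + 1]).getLast hne = (m : Int) + 1 := by
        have h2 : ([0] ++ F ++ [(m : Int) + 1] : List Int).getLast? = some ((m : Int) + 1) :=
          List.getLast?_concat
        rw [List.getLast?_eq_some_getLast hne] at h2
        exact Option.some_inj.mp h2
      rw [hlast]
      have hc : PySem.List.pyRange ((m : Int) + 1) ((m : Int) + 1 + 1) 1 = [(m : Int) + 1] := by
        rw [PySem.List.pyRange_one_cons (by omega), PySem.List.pyRange_one_eq_nil (by omega)]
      simp [hc, join_singleton]
    · rw [if_neg hbr, if_neg hbr]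
      have hgrp2 : ([0] ++ (F ++ []) ++ [(m : Int) + 1 + 1] : List Int)
          = ([0] ++ F) ++ [(m : Int) + 1 + 1] := by simp
      rw [hgrp2]
      have hys : ([0] ++ F : List Int) ≠ [] := by simp
      rw [show ([0] ++ F ++ [(m : Int) + 1] : List Int) = ([0] ++ F) ++ [(m : Int) + 1] from rfl]
      rw [zip_tail_append_singleton ([0] ++ F) ((m : Int) + 1) hys,
        zip_tail_append_singleton ([0] ++ F) ((m : Int) + 1 + 1) hys,
        List.map_append, List.map_append]
      set L := ([0] ++ F : List Int).getLast hys with hLdef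
      have hLb : 0 ≤ L ∧ L ≤ (m : Int) := by
        have hmem : L ∈ ([0] ++ F : List Int) := hLdef ▸ List.getLast_mem hys
        rcases List.mem_append.mp hmem with h0 | hFm
        · simp at h0; omega
        · have := mem_filter_range_bound (hF ▸ hFm); omega
      simp only [List.map_cons, List.map_nil]
      rw [List.dropLast_concat, PySem.List.pyGet?_neg_one, List.getLast?_concat]
      simp only [Option.getD_some]
      have hr2 : PySem.List.pyRange L ((m : Int) + 1 + 1) 1
          = PySem.List.pyRange L ((m : Int) + 1) 1 ++ [(m : Int) + 1] :=
        PySem.List.pyRange_one_succ_right (by omega)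
      have hchne : (PySem.List.pyRange L ((m : Int) + 1) 1).map t ≠ [] := by
        apply List.ne_nil_of_length_pos
        simp [PySem.List.length_pyRange_one]
        omega
      rw [hr2, List.map_append]
      simp only [List.map_cons, List.map_nil]
      rw [join_append_singleton _ _ hchne]

-- seq[a:b] is the tokens at indices a..b-1 (for in-range bounds)
lemma slice_eq_map_tok (seq : List String) (pa pb : Int) (h1 : 0 ≤ pa) (h2 : 0 ≤ pb)
    (h3 : pb ≤ (seq.length : Int)) :
    PySem.List.slice seq (some pa) (some pb) = (PySem.List.pyRange pa pb 1).map (pvTok seq) := by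
  obtain ⟨a, rfl⟩ : ∃ a : Nat, pa = (a : Int) := ⟨pa.toNat, (Int.toNat_of_nonneg h1).symm⟩
  obtain ⟨b, rfl⟩ : ∃ b : Nat, pb = (b : Int) := ⟨pb.toNat, (Int.toNat_of_nonneg h2).symm⟩
  have h3' : b ≤ seq.length := by exact_mod_cast h3
  rw [PySem.List.slice_natCast, PySem.List.pyRange_one, List.map_map]
  have hab : (((b : Int)) - ((a : Int))).toNat = b - a := by omega
  rw [hab]
  apply List.ext_getElem
  · simp; omega
  · intro i hi1 hi2
    have hi1' : i < b - a ∧ a + i < seq.length := by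
      simp [List.length_take, List.length_drop] at hi1
      omega
    simp only [List.getElem_take, List.getElem_drop, List.getElem_map, List.getElem_range,
      Function.comp_apply]
    unfold pvTok
    rw [show (a : Int) + (i : Int) = ((a + i : Nat) : Int) by push_cast; ring,
      PySem.List.pyGet?_natCast, List.getElem?_eq_getElem hi1'.2]
    simp

-- A's diff[i] is exactly the contiguity value loc[i].2 - loc[i+1].1
lemma diff_val (loc : List (Int × Int)) (x : Int) (h0 : 0 ≤ x) (h1 : x < (loc.length : Int) - 1) :
    PySem.List.pyGetD ((List.zip ((loc.map Prod.snd).dropLast) ((loc.map Prod.fst).tail)).map (fun p => p.1 - p.2)) x 0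
      = ((PySem.List.pyGet? loc x).getD (0, 0)).2 - ((PySem.List.pyGet? loc (x + 1)).getD (0, 0)).1 := by
  obtain ⟨j, rfl⟩ : ∃ j : Nat, x = (j : Int) := ⟨x.toNat, (Int.toNat_of_nonneg h0).symm⟩
  have hj : j + 1 < loc.length := by omega
  have hlen : j < ((List.zip ((loc.map Prod.snd).dropLast) ((loc.map Prod.fst).tail)).map (fun p => p.1 - p.2)).length := by
    simp [List.length_zip]; omega
  rw [PySem.List.pyGetD_eq_getElem _ _ (by positivity) (by exact_mod_cast hlen)]
  have hx1 : (j : Int) + 1 = ((j + 1 : Nat) : Int) := by push_cast; ring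
  rw [hx1, PySem.List.pyGet?_natCast, PySem.List.pyGet?_natCast]
  simp [List.getElem_zip, List.getElem_dropLast, List.getElem_tail,
    List.getElem?_eq_getElem (by omega : j < loc.length), List.getElem?_eq_getElem hj]

lemma ports_agree (seq : List String) (loc : List (Int × Int)) (hloc : loc ≠ [])
    (hlenle : loc.length ≤ seq.length) :
    combine_labels_py seq loc = combine_labels_py_alt seq loc := by
  obtain ⟨m, hm⟩ : ∃ m : Nat, loc.length = m + 1 :=
    ⟨loc.length - 1, by have := List.length_pos_iff.mpr hloc; omega⟩
  have hmain := pv_main (pvBr loc) (pvTok seq) m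
  simp only [pvTok] at hmain
  unfold combine_labels_py combine_labels_py_alt
  simp only [PySem.List.slice_to_neg_one, PySem.List.slice_from_one]
  rw [PySem.List.enumerate_eq_map_pyRange _ (0 : Int), List.foldl_map]
  have hdlen : PySem.List.len ((List.zip ((loc.map Prod.snd).dropLast) ((loc.map Prod.fst).tail)).map (fun p => p.1 - p.2)) = (m : Int) := by
    simp [PySem.List.len, List.length_zip]; omega
  rw [hdlen]
  rw [PySem.List.foldl_congr_mem _ _
      (fun tn i => if pvBr loc i then tn ++ [(PySem.List.pyGet? seq (i + 1)).getD ""]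
        else tn.dropLast ++ [(PySem.List.pyGet? tn (-1)).getD "" ++ " | " ++ (PySem.List.pyGet? seq (i + 1)).getD ""]) _
      (by
        intro acc x hx
        obtain ⟨hx0, hx1⟩ := PySem.List.mem_pyRange_one.mp hx
        rw [diff_val loc x hx0 (by omega)]
        by_cases h : ((PySem.List.pyGet? loc x).getD (0, 0)).2 = ((PySem.List.pyGet? loc (x + 1)).getD (0, 0)).1
        · simp [pvBr, h]
        · simp [pvBr, h, sub_eq_zero])]
  rw [hmain]
  have hncast : ((loc.length : Int)) = (m : Int) + 1 := by omega
  rw [hncast]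
  have hfilter : (fun j => decide (((PySem.List.pyGet? loc (j - 1)).getD (0, 0)).2 ≠ ((PySem.List.pyGet? loc j).getD (0, 0)).1))
      = (fun j => pvBr loc (j - 1)) := by
    funext j
    simp [pvBr, sub_add_cancel]
  rw [hfilter]
  rw [show ([0] ++ (PySem.List.pyRange 1 ((m : Int) + 1) 1).filter (fun j => pvBr loc (j - 1)) ++ [(m : Int) + 1] : List Int)
      = pvBounds (pvBr loc) m from rfl]
  unfold pvChunks
  symm
  apply List.map_congr_left
  intro p hp
  obtain ⟨hp1m, hp2t⟩ := List.of_mem_zip hp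
  have hp2m := List.mem_of_mem_tail hp2t
  have h1 := pvBounds_mem _ _ _ hp1m
  have h2 := pvBounds_mem _ _ _ hp2m
  rw [slice_eq_map_tok seq p.1 p.2 h1.1 h2.1 (by omega)]

-- ===== VERDICT (by name: the statement is the Claim_ definition above) =====
theorem combine_labels_py_spec : Claim_equal_combine_labels_py := by
  intro seq loc _ hpre
  exact ports_agree seq loc hpre.2.1 hpre.2.2
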